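-- pv_equiv track=rewrite | github.com/rmffpaps98/CodingTest | 프로그래머스/2/42586. 기능개발/기능개발.py | solution
-- ===== SOURCE A (Python) =====
-- def solution(progresses, speeds):
--     answer = []
--     day = []
--
--     for i, j in zip(progresses, speeds) :
--         d = 0
--         while i < 100 :
--             d += 1
--             i += j
--         day.append(d)
--
--     prev = day[0]
--     c = 1
--     for i in day[1:] :
--         if i <= prev :
--             c += 1
--         else :
--             answer.append(c)
--             c = 1
--             prev = i
--
--     answer.append(c)
--     return answer
-- ===== SOURCE B (Python) =====
-- def solution(progresses, speeds):
--     answer = []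
--     leader = None
--     for p, s in zip(progresses, speeds):
--         d = 0 if p >= 100 else -((p - 100) // s)  # ceil((100-p)/s) in O(1)
--         if leader is None or d > leader:
--             leader = d
--             answer.append(1)
--         else:
--             answer[-1] += 1
--     return answer
-- ===== Notes on version B (the rewrite author's own statement) =====
-- stated objective: faster
-- what changed: Per-feature day count is computed in O(1) with ceiling division instead of a step-by-step while loop, and the grouping is fused into the same single pass (incrementing answer[-1]) instead of a second pass over a days list; intended as faster: a timing run saw A time out at n=16 where B returned, so no clean ratio could be measured at a common largest size.
import Mathlib
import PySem

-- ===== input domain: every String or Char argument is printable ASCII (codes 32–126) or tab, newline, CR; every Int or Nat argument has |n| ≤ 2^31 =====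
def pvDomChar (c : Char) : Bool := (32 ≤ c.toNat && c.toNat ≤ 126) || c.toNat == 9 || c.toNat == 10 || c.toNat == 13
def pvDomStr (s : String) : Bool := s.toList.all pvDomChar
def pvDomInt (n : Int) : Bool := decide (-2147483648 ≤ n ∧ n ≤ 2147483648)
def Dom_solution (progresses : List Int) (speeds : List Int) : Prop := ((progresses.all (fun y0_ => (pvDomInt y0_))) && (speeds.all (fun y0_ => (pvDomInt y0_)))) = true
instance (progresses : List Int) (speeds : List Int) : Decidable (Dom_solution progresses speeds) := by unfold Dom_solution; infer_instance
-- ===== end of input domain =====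

-- ===== PORT A =====
-- While-loop 'while i < 100: d += 1; i += j' of A. The 'j ≤ 0' branch only makes the
-- function total where the Python loop diverges (excluded by Pre_solution).
def whileDays (i j d : Int) : Int :=
  if _h : i < 100 then
    if _hj : j ≤ 0 then 0
    else whileDays (i + j) j (d + 1)
  else d
termination_by (100 - i).toNat
decreasing_by
  have : 0 < j := by omega
  omega

def groupA : List Int → Int → Int → List Int → List Int
  | [], _prev, c, answer => answer ++ [c]
  | i :: t, prev, c, answer =>
      if i ≤ prev then groupA t prev (c + 1) answer
      else groupA t i 1 (answer ++ [c])

def solution (progresses : List Int) (speeds : List Int) : List Int :=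
  let day := (progresses.zip speeds).map (fun pj => whileDays pj.1 pj.2 0)
  match day with
  | [] => []                         -- Python raises IndexError at day[0]; excluded by Pre_solution
  | prev :: rest => groupA rest prev 1 []

-- ===== PORT B =====
def daysB (p s : Int) : Int :=
  if 100 ≤ p then 0 else -(PySem.Int.floordiv (p - 100) s)

-- B's single pass; 'answer[-1] += 1' is rendered on the reversed answer list (head = last).
def stepB (st : Option Int × List Int) (ps : Int × Int) : Option Int × List Int :=
  let d := daysB ps.1 ps.2
  match st with
  | (none, rev) => (some d, 1 :: rev)
  | (some l, rev) => if d > l then (some d, 1 :: rev) else (some l, (rev.headD 0 + 1) :: rev.tail)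

def solution_alt (progresses : List Int) (speeds : List Int) : List Int :=
  ((progresses.zip speeds).foldl stepB (none, [])).2.reverse

-- ===== PRECONDITION & SPEC =====
-- Pre_ excludes exactly the inputs where Python A does not return: empty zipped input
-- (IndexError at day[0]) and any feature with speed ≤ 0 still below 100 (infinite while loop).
def Pre_solution (progresses : List Int) (speeds : List Int) : Prop :=
  progresses ≠ [] ∧ speeds ≠ [] ∧ ∀ ps ∈ progresses.zip speeds, 100 ≤ ps.1 ∨ 0 < ps.2
instance (progresses : List Int) (speeds : List Int) : Decidable (Pre_solution progresses speeds) := by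
  unfold Pre_solution; infer_instance
def pvWitness_solution : List Int × List Int := ([93, 30, 55], [1, 30, 5])

def Spec_solution (progresses : List Int) (speeds : List Int) (out : List Int) : Prop := out = solution_alt progresses speeds
instance (progresses : List Int) (speeds : List Int) (out : List Int) : Decidable (Spec_solution progresses speeds out) := by unfold Spec_solution; infer_instance

-- ===== CLAIM (what is proved, stated in full; the proofs are below) =====
def Claim_equal_solution : Prop := ∀ (progresses : List Int) (speeds : List Int), Dom_solution progresses speeds → Pre_solution progresses speeds → Spec_solution progresses speeds (solution progresses speeds)

-- ===== LEMMAS AND PROOFS =====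

-- A's while loop equals B's ceiling division, for positive speed or already-finished progress.
lemma whileDays_eq_daysB (p s d : Int) (h : 100 ≤ p ∨ 0 < s) :
    whileDays p s d = d + daysB p s := by
  rw [whileDays]
  by_cases hp : p < 100
  · have hs : 0 < s := by omega
    rw [dif_pos hp, dif_neg (by omega : ¬ s ≤ 0),
        whileDays_eq_daysB (p + s) s (d + 1) (Or.inr hs)]
    unfold daysB
    by_cases h2 : 100 ≤ p + s
    · rw [if_pos h2, if_neg (by omega : ¬ 100 ≤ p)]
      have hfd : PySem.Int.floordiv (p - 100) s = -1 := by
        rw [PySem.Int.floordiv_eq_iff_of_pos hs]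
        constructor <;> nlinarith
      rw [hfd]; ring
    · rw [if_neg h2, if_neg (by omega : ¬ 100 ≤ p)]
      have hfd : PySem.Int.floordiv (p + s - 100) s = PySem.Int.floordiv (p - 100) s + 1 := by
        rw [PySem.Int.floordiv_eq_ediv_of_pos hs, PySem.Int.floordiv_eq_ediv_of_pos hs]
        have h3 := Int.add_mul_ediv_right (p - 100) 1 (by omega : s ≠ 0)
        rw [one_mul] at h3
        rw [show p + s - 100 = p - 100 + s by ring, h3]
      rw [hfd]; ring
  · rw [dif_neg hp]
    unfold daysB
    rw [if_pos (by omega)]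
    ring
termination_by (100 - p).toNat
decreasing_by omega

-- The grouping step of B on an already-computed day count.
def stepD (st : Option Int × List Int) (d : Int) : Option Int × List Int :=
  match st with
  | (none, r) => (some d, 1 :: r)
  | (some l, r) => if d > l then (some d, 1 :: r) else (some l, (r.headD 0 + 1) :: r.tail)

lemma stepB_eq_stepD (st : Option Int × List Int) (ps : Int × Int) :
    stepB st ps = stepD st (daysB ps.1 ps.2) := by
  cases st with
  | mk o r => cases o <;> rfl

-- A's second pass equals B's fused accumulator, over the same days list.
lemma groupA_eq_foldl (rest : List Int) (prev c : Int) (rev : List Int) :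
    groupA rest prev c rev.reverse = ((rest.foldl stepD (some prev, c :: rev)).2).reverse := by
  induction rest generalizing prev c rev with
  | nil => simp [groupA]
  | cons i t ih =>
      rw [groupA, List.foldl_cons]
      by_cases hi : i ≤ prev
      · rw [if_pos hi]
        have hstep : stepD (some prev, c :: rev) i = (some prev, (c + 1) :: rev) := by
          simp [stepD, show ¬ i > prev by omega]
        rw [hstep]; exact ih prev (c + 1) rev
      · rw [if_neg hi]
        have hstep : stepD (some prev, c :: rev) i = (some i, 1 :: c :: rev) := by
          simp [stepD, show i > prev by omega]
        rw [hstep]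
        have := ih i 1 (c :: rev)
        simpa using this

-- ===== VERDICT (by name: the statement is the Claim_ definition above) =====
theorem solution_spec : Claim_equal_solution := by
  intro progresses speeds _ hpre
  obtain ⟨hp, hs, hall⟩ := hpre
  unfold Spec_solution solution solution_alt
  cases progresses with
  | nil => exact absurd rfl hp
  | cons a as =>
    cases speeds with
    | nil => exact absurd rfl hs
    | cons b bs =>
      have hz : (a :: as).zip (b :: bs) = (a, b) :: as.zip bs := rfl
      rw [hz] at hall ⊢
      simp only [List.map_cons, List.foldl_cons]
      have hmap : (as.zip bs).map (fun pj => whileDays pj.1 pj.2 0)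
          = (as.zip bs).map (fun pj => daysB pj.1 pj.2) := by
        apply List.map_congr_left
        intro z hz'
        have := whileDays_eq_daysB z.1 z.2 0 (hall z (List.mem_cons_of_mem _ hz'))
        omega
      have hhead : whileDays a b 0 = daysB a b := by
        have := whileDays_eq_daysB a b 0 (hall (a, b) (List.mem_cons_self))
        omega
      rw [hmap, hhead]
      have hfold : (as.zip bs).foldl stepB (stepB (none, []) (a, b))
          = ((as.zip bs).map (fun pj => daysB pj.1 pj.2)).foldl stepD (stepB (none, []) (a, b)) := by
        have hfun : stepB = fun st (z : Int × Int) => stepD st (daysB z.1 z.2) := by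
          funext st z; exact stepB_eq_stepD st z
        rw [List.foldl_map, hfun]
      rw [hfold]
      have hinit : stepB (none, ([] : List Int)) (a, b) = (some (daysB a b), [1]) := rfl
      rw [hinit]
      have := groupA_eq_foldl ((as.zip bs).map (fun pj => daysB pj.1 pj.2)) (daysB a b) 1 []
      simpa using this
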